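-- pv_equiv track=rewrite | github.com/markodowd/code-challanges | advent-of-code/2024/2/2.py | validate_safe_report_dampened
-- ===== SOURCE A (Python) =====
-- from typing import List
--
-- def validate_safe_report_dampened(numbers: List[int]) -> bool:
--     is_increasing = None
--     rule_breaks = 0
--
--     for index in range(1, len(numbers)):
--         diff = numbers[index] - numbers[index-1]
--
--         if abs(diff) not in range(1,4):
--             return False
--
--         if diff > 0:
--             if is_increasing is None:
--                 is_increasing = True
--             elif is_increasing is False:
--                 rule_breaks += 1
--
--                 if rule_breaks > 1:
--                     return False
--         elif diff < 0:
--             if is_increasing is None: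
--                 is_increasing = False
--             elif is_increasing is True:
--                 rule_breaks += 1
--
--                 if rule_breaks > 1:
--                     return False
--
--
--     return True
-- ===== SOURCE B (Python) =====
-- from typing import List
--
-- def validate_safe_report_dampened(numbers: List[int]) -> bool:
--     n = len(numbers)
--     if n < 2:
--         return True
--     total = 0
--     for i in range(n - 1):
--         d = numbers[i + 1] - numbers[i]
--         if abs(d) not in range(1, 4):
--             return False
--         total += 1 if d > 0 else -1
--     # With k = n-1 steps, each counted +1/-1, the number of steps opposing the
--     # first step's direction is (k - f*total)/2 where f = sign of first step;
--     # "at most one opposing step" is exactly f*total >= k - 2 = n - 3.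
--     if numbers[1] > numbers[0]:
--         return total >= n - 3
--     return -total >= n - 3
-- ===== Notes on version B (the rewrite author's own statement) =====
-- stated objective: alternative
-- what changed: Replaces A's stateful direction-flag plus rule-break counter by a signed sum of step directions (+1/-1 per step) decided with a single arithmetic inequality f*total >= n-3, using the identity that the number of steps opposing the first equals (n-1 - f*total)/2.
import Mathlib
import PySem

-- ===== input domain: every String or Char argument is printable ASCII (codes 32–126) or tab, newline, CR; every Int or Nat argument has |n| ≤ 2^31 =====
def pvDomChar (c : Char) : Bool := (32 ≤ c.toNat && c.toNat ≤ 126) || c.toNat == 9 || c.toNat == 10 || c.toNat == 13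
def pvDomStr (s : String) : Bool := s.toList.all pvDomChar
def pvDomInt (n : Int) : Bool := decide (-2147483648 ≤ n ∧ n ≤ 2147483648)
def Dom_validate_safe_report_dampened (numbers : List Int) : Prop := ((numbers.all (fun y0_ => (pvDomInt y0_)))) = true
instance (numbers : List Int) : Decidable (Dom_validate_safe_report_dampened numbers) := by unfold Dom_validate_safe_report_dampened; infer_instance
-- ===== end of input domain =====

-- B replaces A's direction-flag/break-counter loop by a signed sum of step
-- directions decided with one arithmetic inequality (objective: alternative).

-- ===== PORT A =====
-- A's loop 'for index in range(1, len(numbers))' reads numbers[index] and numbers[index-1];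
-- ported as the obvious structural recursion over adjacent elements with the same state
-- (is_increasing : Option Bool, rule_breaks : Int) and branches in the same order.
-- 'abs(diff) in range(1,4)' is exact for ints as 1 ≤ |diff| ∧ |diff| < 4.
def vsrdLoopA : List Int → Option Bool → Int → Bool
  | prev :: cur :: rest, isInc, ruleBreaks =>
    let diff := cur - prev
    if ¬ (1 ≤ |diff| ∧ |diff| < 4) then false
    else if diff > 0 then
      match isInc with
      | none => vsrdLoopA (cur :: rest) (some true) ruleBreaks
      | some false =>
          if ruleBreaks + 1 > 1 then false
          else vsrdLoopA (cur :: rest) (some false) (ruleBreaks + 1)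
      | some true => vsrdLoopA (cur :: rest) (some true) ruleBreaks
    else if diff < 0 then
      match isInc with
      | none => vsrdLoopA (cur :: rest) (some false) ruleBreaks
      | some true =>
          if ruleBreaks + 1 > 1 then false
          else vsrdLoopA (cur :: rest) (some true) (ruleBreaks + 1)
      | some false => vsrdLoopA (cur :: rest) (some false) ruleBreaks
    else vsrdLoopA (cur :: rest) isInc ruleBreaks
  | _, _, _ => true

def validate_safe_report_dampened (numbers : List Int) : Bool :=
  vsrdLoopA numbers none 0

-- ===== PORT B =====
-- B's loop over the n-1 adjacent steps: early 'return False' on an out-of-range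
-- step (|d| ∉ range(1,4), exact for ints as below), otherwise accumulate
-- total += 1 if d > 0 else -1.  'none' is the early False return.
def vsrdScanB : List Int → Int → Option Int
  | x :: y :: rest, total =>
      let d := y - x
      if ¬ (1 ≤ |d| ∧ |d| < 4) then none
      else vsrdScanB (y :: rest) (total + if d > 0 then 1 else -1)
  | _, total => some total

def validate_safe_report_dampened_alt (numbers : List Int) : Bool :=
  match numbers with
  | [] => true
  | [_] => true
  | a :: b :: rest =>
    match vsrdScanB (a :: b :: rest) 0 with
    | none => false
    | some total =>
      if b > a then decide (total ≥ ((a :: b :: rest).length : Int) - 3)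
      else decide (-total ≥ ((a :: b :: rest).length : Int) - 3)

-- ===== PRECONDITION & SPEC =====
def Spec_validate_safe_report_dampened (numbers : List Int) (out : Bool) : Prop := out = validate_safe_report_dampened_alt numbers
instance (numbers : List Int) (out : Bool) : Decidable (Spec_validate_safe_report_dampened numbers out) := by unfold Spec_validate_safe_report_dampened; infer_instance

-- ===== CLAIM =====
def Claim_equal_validate_safe_report_dampened : Prop := ∀ (numbers : List Int), Dom_validate_safe_report_dampened numbers → Spec_validate_safe_report_dampened numbers (validate_safe_report_dampened numbers)

-- ===== LEMMAS AND PROOFS =====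

-- consecutive differences of the list, used only by the proofs
def vsrdDiffs (numbers : List Int) : List Int :=
  (numbers.zip (numbers.drop 1)).map (fun p => p.2 - p.1)

-- 'step opposes direction up'
def vsrdOpp (up : Bool) (d : Int) : Bool := decide ((d > 0) ≠ (up = true))

-- signed sum of step directions
def vsrdSgnSum (l : List Int) : Int := (l.map (fun d => if d > 0 then (1 : Int) else -1)).sum

theorem vsrdDiffs_cons (x y : Int) (rest : List Int) :
    vsrdDiffs (x :: y :: rest) = (y - x) :: vsrdDiffs (y :: rest) := by
  simp [vsrdDiffs]

theorem vsrdOpp_of_pos {d : Int} (h : 0 < d) (up : Bool) : vsrdOpp up d = !up := by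
  cases up <;> simp [vsrdOpp, h]

theorem vsrdOpp_of_neg {d : Int} (h : d < 0) (up : Bool) : vsrdOpp up d = up := by
  have : ¬ (d > 0) := by omega
  cases up <;> simp [vsrdOpp, this]

-- If some difference is out of range, A's loop returns false from any state.
theorem vsrdLoopA_bad (l : List Int) (isInc : Option Bool) (rb : Int)
    (h : ∃ d ∈ vsrdDiffs l, ¬ (1 ≤ |d| ∧ |d| < 4)) :
    vsrdLoopA l isInc rb = false := by
  induction l generalizing isInc rb with
  | nil => simp [vsrdDiffs] at h
  | cons x tl ih =>
    cases tl with
    | nil => simp [vsrdDiffs] at h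
    | cons y rest =>
      rw [vsrdDiffs_cons] at h
      simp only [List.mem_cons] at h
      obtain ⟨d, hd, hbad⟩ := h
      by_cases hgood : 1 ≤ |y - x| ∧ |y - x| < 4
      · have h' : ∃ d ∈ vsrdDiffs (y :: rest), ¬ (1 ≤ |d| ∧ |d| < 4) := by
          rcases hd with rfl | hd
          · exact absurd hgood hbad
          · exact ⟨d, hd, hbad⟩
        show (if ¬ (1 ≤ |y - x| ∧ |y - x| < 4) then false
          else if y - x > 0 then
            match isInc with
            | none => vsrdLoopA (y :: rest) (some true) rb
            | some false => if rb + 1 > 1 then false else vsrdLoopA (y :: rest) (some false) (rb + 1)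
            | some true => vsrdLoopA (y :: rest) (some true) rb
          else if y - x < 0 then
            match isInc with
            | none => vsrdLoopA (y :: rest) (some false) rb
            | some true => if rb + 1 > 1 then false else vsrdLoopA (y :: rest) (some true) (rb + 1)
            | some false => vsrdLoopA (y :: rest) (some false) rb
          else vsrdLoopA (y :: rest) isInc rb) = false
        rw [if_neg (not_not_intro hgood)]
        rcases lt_trichotomy (0 : Int) (y - x) with hpos | hzero | hneg
        · rw [if_pos hpos]
          cases isInc with
          | none => exact ih _ _ h'
          | some b =>
            cases b
            · split_ifs with _
              · rfl
              · exact ih _ _ h'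
            · exact ih _ _ h'
        · exact absurd hgood (by rw [← hzero]; simp)
        · rw [if_neg (by omega), if_pos hneg]
          cases isInc with
          | none => exact ih _ _ h'
          | some b =>
            cases b
            · exact ih _ _ h'
            · split_ifs with _
              · rfl
              · exact ih _ _ h'
      · show (if ¬ (1 ≤ |y - x| ∧ |y - x| < 4) then false else _) = false
        rw [if_pos hgood]

-- When all differences are in range, A's loop with a fixed direction computes
-- "count of opposite-sign differences plus rule_breaks ≤ 1".
theorem vsrdLoopA_good (l : List Int) (up : Bool) (rb : Int) (hrb : rb ≤ 1)
    (h : ∀ d ∈ vsrdDiffs l, 1 ≤ |d| ∧ |d| < 4) :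
    vsrdLoopA l (some up) rb =
      decide ((((vsrdDiffs l).countP (vsrdOpp up)) : Int) + rb ≤ 1) := by
  induction l generalizing rb with
  | nil => simp [vsrdLoopA, vsrdDiffs]; omega
  | cons x tl ih =>
    cases tl with
    | nil => simp [vsrdLoopA, vsrdDiffs]; omega
    | cons y rest =>
      rw [vsrdDiffs_cons] at h ⊢
      have hgood := h _ (List.mem_cons_self ..)
      have htail : ∀ d ∈ vsrdDiffs (y :: rest), 1 ≤ |d| ∧ |d| < 4 := by
        intro d hd; exact h d (List.mem_cons_of_mem _ hd)
      have hc : (0 : Int) ≤ (((vsrdDiffs (y :: rest)).countP (vsrdOpp up)) : Int) :=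
        Int.natCast_nonneg _
      show (if ¬ (1 ≤ |y - x| ∧ |y - x| < 4) then false
        else if y - x > 0 then
          match (some up : Option Bool) with
          | none => vsrdLoopA (y :: rest) (some true) rb
          | some false => if rb + 1 > 1 then false else vsrdLoopA (y :: rest) (some false) (rb + 1)
          | some true => vsrdLoopA (y :: rest) (some true) rb
        else if y - x < 0 then
          match (some up : Option Bool) with
          | none => vsrdLoopA (y :: rest) (some false) rb
          | some true => if rb + 1 > 1 then false else vsrdLoopA (y :: rest) (some true) (rb + 1)
          | some false => vsrdLoopA (y :: rest) (some false) rb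
        else vsrdLoopA (y :: rest) (some up) rb) = _
      rw [if_neg (not_not_intro hgood)]
      rcases lt_trichotomy (0 : Int) (y - x) with hpos | hzero | hneg
      · rw [if_pos hpos]
        cases up with
        | true =>
          have hopp : vsrdOpp true (y - x) = false := by rw [vsrdOpp_of_pos hpos]; rfl
          rw [ih rb hrb htail, List.countP_cons_of_neg (by simp [hopp])]
        | false =>
          have hopp : vsrdOpp false (y - x) = true := by rw [vsrdOpp_of_pos hpos]; rfl
          split_ifs with hgt
          · symm
            rw [decide_eq_false_iff_not, List.countP_cons_of_pos hopp]
            push_cast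
            omega
          · rw [ih (rb + 1) (by omega) htail, List.countP_cons_of_pos hopp,
              decide_eq_decide]
            push_cast
            omega
      · exact absurd hgood (by rw [← hzero]; simp)
      · rw [if_neg (by omega), if_pos hneg]
        cases up with
        | false =>
          have hopp : vsrdOpp false (y - x) = false := by rw [vsrdOpp_of_neg hneg]
          rw [ih rb hrb htail, List.countP_cons_of_neg (by simp [hopp])]
        | true =>
          have hopp : vsrdOpp true (y - x) = true := by rw [vsrdOpp_of_neg hneg]
          split_ifs with hgt
          · symm
            rw [decide_eq_false_iff_not, List.countP_cons_of_pos hopp]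
            push_cast
            omega
          · rw [ih (rb + 1) (by omega) htail, List.countP_cons_of_pos hopp,
              decide_eq_decide]
            push_cast
            omega

-- B's scan on a bad list is the early False return.
theorem vsrdScanB_bad (l : List Int) (t : Int)
    (h : ∃ d ∈ vsrdDiffs l, ¬ (1 ≤ |d| ∧ |d| < 4)) :
    vsrdScanB l t = none := by
  induction l generalizing t with
  | nil => simp [vsrdDiffs] at h
  | cons x tl ih =>
    cases tl with
    | nil => simp [vsrdDiffs] at h
    | cons y rest =>
      rw [vsrdDiffs_cons] at h
      simp only [List.mem_cons] at h
      obtain ⟨d, hd, hbad⟩ := h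
      by_cases hgood : 1 ≤ |y - x| ∧ |y - x| < 4
      · have h' : ∃ d ∈ vsrdDiffs (y :: rest), ¬ (1 ≤ |d| ∧ |d| < 4) := by
          rcases hd with rfl | hd
          · exact absurd hgood hbad
          · exact ⟨d, hd, hbad⟩
        show (if ¬ (1 ≤ |y - x| ∧ |y - x| < 4) then none
          else vsrdScanB (y :: rest) (t + if y - x > 0 then 1 else -1)) = none
        rw [if_neg (not_not_intro hgood)]
        exact ih _ h'
      · show (if ¬ (1 ≤ |y - x| ∧ |y - x| < 4) then none else _) = none
        rw [if_pos hgood]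

-- B's scan on a good list returns the accumulated signed sum.
theorem vsrdScanB_good (l : List Int) (t : Int)
    (h : ∀ d ∈ vsrdDiffs l, 1 ≤ |d| ∧ |d| < 4) :
    vsrdScanB l t = some (t + vsrdSgnSum (vsrdDiffs l)) := by
  induction l generalizing t with
  | nil => simp [vsrdScanB, vsrdDiffs, vsrdSgnSum]
  | cons x tl ih =>
    cases tl with
    | nil => simp [vsrdScanB, vsrdDiffs, vsrdSgnSum]
    | cons y rest =>
      rw [vsrdDiffs_cons] at h ⊢
      have hgood := h _ (List.mem_cons_self ..)
      have htail : ∀ d ∈ vsrdDiffs (y :: rest), 1 ≤ |d| ∧ |d| < 4 := by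
        intro d hd; exact h d (List.mem_cons_of_mem _ hd)
      show (if ¬ (1 ≤ |y - x| ∧ |y - x| < 4) then none
        else vsrdScanB (y :: rest) (t + if y - x > 0 then 1 else -1)) = _
      rw [if_neg (not_not_intro hgood), ih _ htail]
      simp only [vsrdSgnSum, List.map_cons, List.sum_cons, Option.some.injEq]
      ring

theorem vsrdSgnSum_cons (d : Int) (tl : List Int) :
    vsrdSgnSum (d :: tl) = (if d > 0 then 1 else -1) + vsrdSgnSum tl := by
  simp [vsrdSgnSum]

-- the signed sum is (#steps agreeing with up) minus (#steps opposing up), up = true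
theorem vsrdSgnSum_eq (l : List Int) :
    vsrdSgnSum l = ((l.countP (vsrdOpp false)) : Int) - ((l.countP (vsrdOpp true)) : Int) := by
  induction l with
  | nil => simp [vsrdSgnSum]
  | cons d tl ih =>
    by_cases hd : d > 0
    · rw [vsrdSgnSum_cons, if_pos hd,
        List.countP_cons_of_pos (by simp [vsrdOpp, hd]),
        List.countP_cons_of_neg (by simp [vsrdOpp, hd])]
      push_cast
      omega
    · rw [vsrdSgnSum_cons, if_neg hd,
        List.countP_cons_of_neg (by simp [vsrdOpp, hd]),
        List.countP_cons_of_pos (by simp [vsrdOpp, hd])]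
      push_cast
      omega

theorem vsrdCount_len (l : List Int) :
    l.countP (vsrdOpp false) + l.countP (vsrdOpp true) = l.length := by
  induction l with
  | nil => simp
  | cons d tl ih =>
    by_cases hd : d > 0
    · rw [List.countP_cons_of_pos (by simp [vsrdOpp, hd]),
        List.countP_cons_of_neg (by simp [vsrdOpp, hd])]
      simp
      omega
    · rw [List.countP_cons_of_neg (by simp [vsrdOpp, hd]),
        List.countP_cons_of_pos (by simp [vsrdOpp, hd])]
      simp
      omega

theorem vsrdDiffs_length (numbers : List Int) :
    (vsrdDiffs numbers).length = numbers.length - 1 := by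
  cases numbers with
  | nil => simp [vsrdDiffs]
  | cons x tl =>
    simp [vsrdDiffs, List.length_zip]

theorem vsrdAlt_cons (a b : Int) (rest : List Int) :
    validate_safe_report_dampened_alt (a :: b :: rest) =
      (match vsrdScanB (a :: b :: rest) 0 with
       | none => false
       | some total =>
         if b > a then decide (total ≥ ((a :: b :: rest).length : Int) - 3)
         else decide (-total ≥ ((a :: b :: rest).length : Int) - 3)) := rfl

-- ===== VERDICT =====
theorem validate_safe_report_dampened_spec : Claim_equal_validate_safe_report_dampened := by
  intro numbers _
  unfold Spec_validate_safe_report_dampened validate_safe_report_dampened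
  match numbers with
  | [] => simp [vsrdLoopA, validate_safe_report_dampened_alt]
  | [x] => simp [vsrdLoopA, validate_safe_report_dampened_alt]
  | a :: b :: rest =>
    rw [vsrdAlt_cons]
    by_cases hbad : ∃ d ∈ vsrdDiffs (a :: b :: rest), ¬ (1 ≤ |d| ∧ |d| < 4)
    · rw [vsrdLoopA_bad _ none 0 hbad, vsrdScanB_bad _ 0 hbad]
    · have hall : ∀ d ∈ vsrdDiffs (a :: b :: rest), 1 ≤ |d| ∧ |d| < 4 := by
        intro d hd
        by_contra hc
        exact hbad ⟨d, hd, hc⟩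
      rw [vsrdScanB_good _ 0 hall]
      show vsrdLoopA (a :: b :: rest) none 0 =
        (if b > a then
           decide (0 + vsrdSgnSum (vsrdDiffs (a :: b :: rest)) ≥ ((a :: b :: rest).length : Int) - 3)
         else
           decide (-(0 + vsrdSgnSum (vsrdDiffs (a :: b :: rest))) ≥ ((a :: b :: rest).length : Int) - 3))
      have hsum := vsrdSgnSum_eq (vsrdDiffs (a :: b :: rest))
      have hcnt := vsrdCount_len (vsrdDiffs (a :: b :: rest))
      have hlen : (vsrdDiffs (b :: rest)).length = rest.length := by
        rw [vsrdDiffs_length]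
        simp
      rw [vsrdDiffs_cons] at hall
      have hgood := hall _ (List.mem_cons_self ..)
      have htail : ∀ d ∈ vsrdDiffs (b :: rest), 1 ≤ |d| ∧ |d| < 4 := by
        intro d hd; exact hall d (List.mem_cons_of_mem _ hd)
      show (if ¬ (1 ≤ |b - a| ∧ |b - a| < 4) then false
        else if b - a > 0 then vsrdLoopA (b :: rest) (some true) 0
        else if b - a < 0 then vsrdLoopA (b :: rest) (some false) 0
        else vsrdLoopA (b :: rest) none 0) = _
      rw [if_neg (not_not_intro hgood)]
      rcases lt_trichotomy (0 : Int) (b - a) with hpos | hzero | hneg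
      · rw [if_pos hpos, vsrdLoopA_good _ true 0 (by omega) htail]
        rw [if_pos (show b > a by omega)]
        rw [vsrdDiffs_cons,
          List.countP_cons_of_pos (by simp [vsrdOpp_of_pos hpos]),
          List.countP_cons_of_neg (by simp [vsrdOpp_of_pos hpos])] at hsum hcnt
        rw [decide_eq_decide]
        simp only [List.length_cons, vsrdDiffs_cons] at hsum hcnt ⊢
        push_cast at hsum hcnt hlen ⊢
        omega
      · exact absurd hgood (by rw [← hzero]; simp)
      · rw [if_neg (by omega), if_pos hneg, vsrdLoopA_good _ false 0 (by omega) htail]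
        rw [if_neg (show ¬ b > a by omega)]
        rw [vsrdDiffs_cons,
          List.countP_cons_of_neg (by simp [vsrdOpp_of_neg hneg]),
          List.countP_cons_of_pos (by simp [vsrdOpp_of_neg hneg])] at hsum hcnt
        rw [decide_eq_decide]
        simp only [List.length_cons, vsrdDiffs_cons] at hsum hcnt ⊢
        push_cast at hsum hcnt hlen ⊢
        omega
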